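-- pv_equiv track=rewrite | github.com/alo1719/LeetCode | OA/WeRide.dp.py | count_N_9_digit_sum
-- ===== SOURCE A (Python) =====
-- from collections import defaultdict
--
-- def count_N_9_digit_sum(N):
--     sum_dict = defaultdict(int)
--     dp = [[0] * (9*N+1) for _ in range(N+1)]
--     for i in range(10): dp[1][i] = 1
--     for i in range(N+1): dp[i][0] = 1
--     for i in range(2, N+1):
--         for j in range(1, 9*i+1):
--             for k in range(1, 10): # current digit can be 1~9
--                 for l in range(1, i): # how many 0 to add (transferred from which digit)
--                     if j-k > 0:
--                         dp[i][j] += dp[i-l][j-k]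
--                     elif j-k == 0:
--                         dp[i][j] += dp[i-l][j-k]
--                         break # 000 and 00 and 0 are the same
--     for i in range(1, N+1):
--         for j in range(9*N+1):
--             sum_dict[j] += dp[i][j]
--     sum_dict[0] = 1 # again, 000 and 00 and 0 are the same
--     return sum_dict
-- ===== SOURCE B (Python) =====
-- from collections import defaultdict
--
-- def count_N_9_digit_sum(N):
--     # Prefix sums over the row index: S[j] = sum of dp[i][j] for rows 1..i so far,
--     # which removes A's inner l-loop (O(N^2) rows*columns instead of O(N^3)).
--     M = 9 * N
--     S = [0] * (M + 1)
--     for j in range(10):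
--         S[j] = 1                      # row 1 of the dp table
--     for i in range(2, N + 1):
--         new = [1] + [0] * M           # dp row i; new[0] = 1
--         for j in range(1, 9 * i + 1):
--             t = 1 if j <= 9 else 0    # digit k == j finishes the number
--             for k in range(1, min(10, j)):
--                 t += S[j - k]
--             new[j] = t
--         for j in range(M + 1):
--             S[j] += new[j]
--     res = defaultdict(int, {j: S[j] for j in range(M + 1)})
--     res[0] = 1                        # 0, 00, 000 are all the same number
--     return res
-- ===== Notes on version B (the rewrite author's own statement) =====
-- stated objective: faster
-- what changed: B maintains one running prefix-sum array S[j] = sum over rows 1..i of dp[i][j], which eliminates A's innermost loop over all previous rows (the l-loop with its break) and lets the result dict be read directly off S; intended as faster (O(N^2) vs O(N^3)); measured ~42x at the largest size both versions finished, A timed out beyond that.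
-- outside the precondition, e.g. on count_N_9_digit_sum(0): A raises IndexError, B raises IndexError
import Mathlib
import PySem

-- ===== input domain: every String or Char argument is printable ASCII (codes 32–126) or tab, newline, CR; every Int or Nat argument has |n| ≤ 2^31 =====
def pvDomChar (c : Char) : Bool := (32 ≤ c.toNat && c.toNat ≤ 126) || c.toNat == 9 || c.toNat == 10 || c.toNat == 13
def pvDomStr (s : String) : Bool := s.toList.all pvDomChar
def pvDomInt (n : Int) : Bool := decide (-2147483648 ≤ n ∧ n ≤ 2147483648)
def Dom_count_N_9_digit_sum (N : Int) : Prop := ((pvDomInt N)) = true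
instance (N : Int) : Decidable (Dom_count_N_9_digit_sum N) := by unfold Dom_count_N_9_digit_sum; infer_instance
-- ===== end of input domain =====

-- B replaces A's per-cell inner loop over all previous rows by prefix sums over the
-- row index, maintained once per row (objective: faster; intended O(N^2) vs O(N^3),
-- measured ~42x at the largest input size both versions finished).  Both ports model the local
-- mutable Python lists by Lean Arrays (reads/writes exact for the in-range,
-- non-negative indices the Python code uses on inputs satisfying Pre_).

-- ===== PORT A =====

-- dp[i][j]  (row/column indices are the non-negative in-range ints A uses under Pre_)
def aget (dp : Array (Array Int)) (i j : Int) : Int :=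
  ((dp[i.toNat]?).getD #[])[j.toNat]?.getD 0

-- dp[i][j] = v
def aset (dp : Array (Array Int)) (i j v : Int) : Array (Array Int) :=
  dp.modify i.toNat (fun row => row.setIfInBounds j.toNat v)

-- the 'for l in range(1, i)' loop of A, with its early 'break' when j - k == 0
def pvALoop (i j k : Int) : List Int → Array (Array Int) → Array (Array Int)
  | [], dp => dp
  | l :: ls, dp =>
    if 0 < j - k then pvALoop i j k ls (aset dp i j (aget dp i j + aget dp (i - l) (j - k)))
    else if j - k = 0 then aset dp i j (aget dp i j + aget dp (i - l) (j - k))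
    else pvALoop i j k ls dp

def count_N_9_digit_sum (N : Int) : List (Int × Int) :=
  let dp0 : Array (Array Int) :=
    Array.replicate (N + 1).toNat (Array.replicate (9 * N + 1).toNat 0)
  let dp1 := (PySem.List.pyRange 0 10).foldl (fun dp i => aset dp 1 i 1) dp0
  let dp2 := (PySem.List.pyRange 0 (N + 1)).foldl (fun dp i => aset dp i 0 1) dp1
  let dp3 := (PySem.List.pyRange 2 (N + 1)).foldl (fun dp i =>
    (PySem.List.pyRange 1 (9 * i + 1)).foldl (fun dp j =>
      (PySem.List.pyRange 1 10).foldl (fun dp k =>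
        pvALoop i j k (PySem.List.pyRange 1 i) dp) dp) dp) dp2
  let d1 := (PySem.List.pyRange 1 (N + 1)).foldl (fun d i =>
    (PySem.List.pyRange 0 (9 * N + 1)).foldl (fun d j =>
      d.modify j 0 (fun v => v + aget dp3 i j)) d) (PySem.Dict.empty (κ := Int) (ν := Int))
  (d1.insert 0 1).items

-- ===== PORT B =====

-- S[j]
def sget (S : Array Int) (j : Int) : Int := (S[j.toNat]?).getD 0

-- S[j] = v
def sset (S : Array Int) (j v : Int) : Array Int := S.setIfInBounds j.toNat v

def count_N_9_digit_sum_alt (N : Int) : List (Int × Int) :=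
  let M := 9 * N
  let S0 : Array Int := Array.replicate (M + 1).toNat 0
  let S1 := (PySem.List.pyRange 0 10).foldl (fun S j => sset S j 1) S0
  let SF := (PySem.List.pyRange 2 (N + 1)).foldl (fun S i =>
    let new0 : Array Int := #[(1 : Int)] ++ Array.replicate M.toNat 0
    let new := (PySem.List.pyRange 1 (9 * i + 1)).foldl (fun new j =>
      sset new j ((PySem.List.pyRange 1 (min 10 j)).foldl (fun t k => t + sget S (j - k))
        (if j ≤ 9 then (1 : Int) else 0))) new0
    (PySem.List.pyRange 0 (M + 1)).foldl (fun S j => sset S j (sget S j + sget new j)) S) S1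
  let res := (PySem.List.pyRange 0 (M + 1)).foldl (fun d j => d.insert j (sget SF j))
    (PySem.Dict.empty (κ := Int) (ν := Int))
  (res.insert 0 1).items

-- ===== PRECONDITION & SPEC =====
-- A raises IndexError for N ≤ 0 (its dp table then has no row 1 / no column 9);
-- Pre_ excludes exactly those inputs.
def Pre_count_N_9_digit_sum (N : Int) : Prop := 1 ≤ N
instance (N : Int) : Decidable (Pre_count_N_9_digit_sum N) := by unfold Pre_count_N_9_digit_sum; infer_instance
def pvWitness_count_N_9_digit_sum : Int := 2

def Spec_count_N_9_digit_sum (N : Int) (out : List (Int × Int)) : Prop := out = count_N_9_digit_sum_alt N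
instance (N : Int) (out : List (Int × Int)) : Decidable (Spec_count_N_9_digit_sum N out) := by unfold Spec_count_N_9_digit_sum; infer_instance

-- ===== CLAIM (what is proved, stated in full; the proofs are below) =====
def Claim_equal_count_N_9_digit_sum : Prop := ∀ (N : Int), Dom_count_N_9_digit_sum N → Pre_count_N_9_digit_sum N → Spec_count_N_9_digit_sum N (count_N_9_digit_sum N)

-- ===== LEMMAS AND PROOFS =====

-- The common mathematical table: pvRow i = dp row i, pvCum i = column sums of rows 1..i.
def pvRowBody (c : Nat → Int) (j : Nat) : Int :=
  ((List.range 9).map (fun k => if k + 1 < j then c (j - (k + 1)) else if k + 1 = j then (1 : Int) else 0)).sum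

def pvTab : Nat → ((Nat → Int) × (Nat → Int))
  | 0 => (fun _ => 0, fun _ => 0)
  | 1 => (fun j => if j ≤ 9 then 1 else 0, fun j => if j ≤ 9 then 1 else 0)
  | (i + 2) =>
    let c := (pvTab (i + 1)).2
    let r : Nat → Int := fun j =>
      if j = 0 then 1 else if j ≤ 9 * (i + 2) then pvRowBody c j else 0
    (r, fun j => c j + r j)

def pvRow (i : Nat) : Nat → Int := (pvTab i).1
def pvCum (i : Nat) : Nat → Int := (pvTab i).2

theorem pvCum_succ (i x : Nat) : pvCum (i + 1) x = pvCum i x + pvRow (i + 1) x := by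
  cases i with
  | zero => simp [pvCum, pvRow, pvTab]
  | succ n => simp [pvCum, pvRow, pvTab]

theorem pvRow_zero_col (i : Nat) (h : 1 ≤ i) : pvRow i 0 = 1 := by
  match i, h with
  | 1, _ => simp [pvRow, pvTab]
  | (n + 2), _ => simp [pvRow, pvTab]

theorem pvRow_cutoff (i j : Nat) (h : 9 * i < j) : pvRow i j = 0 := by
  match i with
  | 0 => simp [pvRow, pvTab]
  | 1 => simp only [pvRow, pvTab]; rw [if_neg (by omega)]
  | (n + 2) => simp only [pvRow, pvTab]; rw [if_neg (by omega), if_neg (by omega)]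

theorem pvCum_cutoff (i j : Nat) (h : 9 * i < j) : pvCum i j = 0 := by
  induction i with
  | zero => simp [pvCum, pvTab]
  | succ n ih =>
    rw [pvCum_succ, ih (by omega), pvRow_cutoff (n + 1) j h, add_zero]

theorem pvRow_one (j : Nat) : pvRow 1 j = if j ≤ 9 then 1 else 0 := by
  simp [pvRow, pvTab]

theorem pvRow_body (i j : Nat) (hi : 2 ≤ i) (hj1 : 1 ≤ j) (hj2 : j ≤ 9 * i) :
    pvRow i j = pvRowBody (pvCum (i - 1)) j := by
  match i, hi with
  | (n + 2), _ =>
    simp only [pvRow, pvTab]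
    rw [if_neg (by omega), if_pos (by omega)]
    rfl

theorem pvSum_desc (m x : Nat) :
    ((List.range m).map (fun k => pvRow (m - k) x)).sum = pvCum m x := by
  induction m with
  | zero => simp [pvCum, pvTab]
  | succ n ih =>
    have hmap : (List.range (n + 1)).map (fun k => pvRow (n + 1 - k) x)
        = pvRow (n + 1) x :: (List.range n).map (fun k => pvRow (n - k) x) := by
      rw [List.range_succ_eq_map, List.map_cons, List.map_map]
      refine congrArg₂ List.cons (by norm_num) (List.map_congr_left ?_)
      intro k hk
      simp only [Function.comp_apply]
      congr 1
      omega
    rw [hmap, List.sum_cons, ih, pvCum_succ, add_comm]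

theorem pvSum_asc (m x : Nat) :
    ((List.range m).map (fun k => pvRow (k + 1) x)).sum = pvCum m x := by
  induction m with
  | zero => simp [pvCum, pvTab]
  | succ n ih =>
    rw [List.range_succ, List.map_append, List.sum_append, ih, pvCum_succ]
    simp

theorem pvBody_split (c : Nat → Int) (j : Nat) (hj : 1 ≤ j) :
    pvRowBody c j
      = (if j ≤ 9 then 1 else 0)
        + ((List.range (min 9 (j - 1))).map (fun k => c (j - (k + 1)))).sum := by
  by_cases h9 : j ≤ 9
  · interval_cases j <;> simp [pvRowBody, List.range_succ] <;> ring
  · have hmin : min 9 (j - 1) = 9 := by omega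
    rw [hmin, if_neg h9, zero_add]
    refine congrArg List.sum (List.map_congr_left ?_)
    intro k hk
    have hk9 : k < 9 := List.mem_range.mp hk
    rw [if_pos (by omega)]

-- 2-D array basics
def pvWF (N : Int) (dp : Array (Array Int)) : Prop :=
  dp.size = (N + 1).toNat ∧ ∀ r : Nat, r < dp.size → ((dp[r]?).getD #[]).size = (9 * N + 1).toNat

theorem pvWF_aset (N : Int) (dp : Array (Array Int)) (i j v : Int) (h : pvWF N dp) :
    pvWF N (aset dp i j v) := by
  obtain ⟨hs, hr⟩ := h
  refine ⟨by simpa [aset, Array.size_modify] using hs, ?_⟩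
  intro r hrlt
  simp only [aset, Array.size_modify] at hrlt
  simp only [aset, Array.getElem?_modify]
  by_cases hie : i.toNat = r
  · cases hdp : dp[r]? with
    | none => simpa [hie, hdp] using hr r hrlt
    | some row =>
      have := hr r hrlt
      rw [hdp] at this
      simpa [hie, hdp, Array.size_setIfInBounds] using this
  · simpa [hie] using hr r hrlt

theorem aget_aset (N : Int) (dp : Array (Array Int)) (hWF : pvWF N dp) (i j v a b : Int)
    (hi0 : 0 ≤ i) (hiN : i < N + 1) (hj0 : 0 ≤ j) (hjM : j < 9 * N + 1)
    (ha : 0 ≤ a) (hb : 0 ≤ b) :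
    aget (aset dp i j v) a b = if a = i ∧ b = j then v else aget dp a b := by
  obtain ⟨hs, hrows⟩ := hWF
  have hiN' : i.toNat < dp.size := by omega
  have hrow := hrows i.toNat hiN'
  unfold aget aset
  rw [Array.getElem?_modify]
  by_cases hai : a = i
  · subst hai
    rw [if_pos rfl]
    obtain ⟨row, hdp⟩ : ∃ row, dp[a.toNat]? = some row := ⟨_, Array.getElem?_eq_getElem hiN'⟩
    rw [hdp]
    simp only [Option.map_some, Option.getD_some]
    rw [Array.getElem?_setIfInBounds]
    have hrsize : row.size = (9 * N + 1).toNat := by simpa [hdp] using hrow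
    by_cases hbj : b = j
    · subst hbj
      rw [if_pos (by omega), if_pos (by omega)]
      simp
    · rw [if_neg (by omega), if_neg (by simp [hbj])]
  · rw [if_neg (by omega), if_neg (by simp [hai])]

theorem aset_aset (dp : Array (Array Int)) (i j v w : Int) :
    aset (aset dp i j v) i j w = aset dp i j w := by
  unfold aset
  apply Array.ext_getElem?
  intro r
  rw [Array.getElem?_modify, Array.getElem?_modify, Array.getElem?_modify]
  by_cases h : i.toNat = r
  · simp only [h, if_true]
    cases dp[r]? with
    | none => rfl
    | some row => simp [Array.setIfInBounds_setIfInBounds]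
  · simp [h]

theorem aset_self (N : Int) (dp : Array (Array Int)) (hWF : pvWF N dp) (i j : Int)
    (hi0 : 0 ≤ i) (hiN : i < N + 1) (hj0 : 0 ≤ j) (hjM : j < 9 * N + 1) :
    aset dp i j (aget dp i j) = dp := by
  obtain ⟨hs, hrows⟩ := hWF
  have hiN' : i.toNat < dp.size := by omega
  have hrow := hrows i.toNat hiN'
  simp only [aset, aget]
  refine Array.ext_getElem? (fun r => ?_)
  rw [Array.getElem?_modify]
  by_cases h : i.toNat = r
  · subst h
    obtain ⟨row, hdp⟩ : ∃ row, dp[i.toNat]? = some row := ⟨_, Array.getElem?_eq_getElem hiN'⟩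
    rw [hdp]
    simp only [Option.map_some, Option.getD_some]
    refine congrArg some ?_
    have hrsize : row.size = (9 * N + 1).toNat := by simpa [hdp] using hrow
    apply Array.ext_getElem?
    intro r'
    rw [Array.getElem?_setIfInBounds]
    by_cases h' : j.toNat = r'
    · subst h'
      rw [if_pos rfl, if_pos (by omega)]
      have : row[j.toNat]? = some (row[j.toNat]'(by omega)) := Array.getElem?_eq_getElem (by omega)
      rw [this]
      rfl
    · rw [if_neg h']
  · simp [h]

theorem aget_replicate (n m : Nat) (a b : Int) :
    aget (Array.replicate n (Array.replicate m 0)) a b = 0 := by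
  unfold aget
  rw [Array.getElem?_replicate]
  by_cases h : a.toNat < n
  · rw [if_pos h]
    simp only [Option.getD_some]
    rw [Array.getElem?_replicate]
    by_cases h' : b.toNat < m
    · simp [h']
    · simp [h']
  · simp [h]

theorem pvWF_replicate (N : Int) (h : 0 ≤ N) :
    pvWF N (Array.replicate (N + 1).toNat (Array.replicate (9 * N + 1).toNat 0)) := by
  refine ⟨by simp, ?_⟩
  intro r hrlt
  simp only [Array.size_replicate] at hrlt
  rw [Array.getElem?_replicate, if_pos hrlt]
  simp

-- 1-D array basics
theorem size_sset (S : Array Int) (j v : Int) : (sset S j v).size = S.size := by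
  simp [sset, Array.size_setIfInBounds]

theorem sget_sset (S : Array Int) (j v x : Int) (hj0 : 0 ≤ j) (hj : j.toNat < S.size)
    (hx : 0 ≤ x) :
    sget (sset S j v) x = if x = j then v else sget S x := by
  unfold sget sset
  rw [Array.getElem?_setIfInBounds]
  by_cases h : x = j
  · subst h
    rw [if_pos rfl, if_pos (by omega), if_pos rfl]
    rfl
  · rw [if_neg (by omega), if_neg h]

theorem sget_replicate (n : Nat) (x : Int) : sget (Array.replicate n 0) x = 0 := by
  unfold sget
  rw [Array.getElem?_replicate]
  by_cases h : x.toNat < n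
  · simp [h]
  · simp [h]

theorem sget_new0 (M x : Int) (hx : 0 ≤ x) :
    sget (#[(1 : Int)] ++ Array.replicate M.toNat 0) x = if x = 0 then 1 else 0 := by
  unfold sget
  rw [Array.getElem?_append]
  by_cases h : x = 0
  · subst h
    simp
  · rw [if_neg (by simp; omega), if_neg h, Array.getElem?_replicate]
    by_cases h' : x.toNat - 1 < M.toNat
    · simp [h']
    · simp [h']

theorem size_new0 (M : Int) (hM : 0 ≤ M) :
    (#[(1 : Int)] ++ Array.replicate M.toNat 0).size = (M + 1).toNat := by
  simp [Array.size_append, Array.size_replicate]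
  omega

-- write-only 2-D folds (dp[1][i] = 1 and dp[i][0] = 1 loops)
theorem foldl_aset_fixrow (N : Int) (l : List Int) (dp : Array (Array Int)) (hWF : pvWF N dp)
    (r v : Int) (hr0 : 0 ≤ r) (hrN : r < N + 1)
    (hl : ∀ x ∈ l, 0 ≤ x ∧ x < 9 * N + 1) (a b : Int) (ha : 0 ≤ a) (hb : 0 ≤ b) :
    pvWF N (l.foldl (fun dp i => aset dp r i v) dp) ∧
    aget (l.foldl (fun dp i => aset dp r i v) dp) a b
      = if a = r ∧ b ∈ l then v else aget dp a b := by
  induction l generalizing dp with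
  | nil => simpa using hWF
  | cons x xs ih =>
    obtain ⟨hx0, hxM⟩ := hl x (List.mem_cons_self ..)
    obtain ⟨ihWF, ihget⟩ := ih (aset dp r x v) (pvWF_aset N dp r x v hWF)
      (fun y hy => hl y (List.mem_cons_of_mem _ hy))
    refine ⟨ihWF, ?_⟩
    rw [List.foldl_cons] at *
    rw [ihget, aget_aset N dp hWF r x v a b hr0 hrN hx0 hxM ha hb]
    split_ifs <;> simp_all [List.mem_cons]

theorem foldl_aset_fixcol (N : Int) (l : List Int) (dp : Array (Array Int)) (hWF : pvWF N dp)
    (v : Int) (hl : ∀ x ∈ l, 0 ≤ x ∧ x < N + 1) (hM : 0 < 9 * N + 1)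
    (a b : Int) (ha : 0 ≤ a) (hb : 0 ≤ b) :
    pvWF N (l.foldl (fun dp i => aset dp i 0 v) dp) ∧
    aget (l.foldl (fun dp i => aset dp i 0 v) dp) a b
      = if b = 0 ∧ a ∈ l then v else aget dp a b := by
  induction l generalizing dp with
  | nil => simpa using hWF
  | cons x xs ih =>
    obtain ⟨hx0, hxM⟩ := hl x (List.mem_cons_self ..)
    obtain ⟨ihWF, ihget⟩ := ih (aset dp x 0 v) (pvWF_aset N dp x 0 v hWF)
      (fun y hy => hl y (List.mem_cons_of_mem _ hy))
    refine ⟨ihWF, ?_⟩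
    rw [List.foldl_cons] at *
    rw [ihget, aget_aset N dp hWF x 0 v a b hx0 hxM le_rfl hM ha hb]
    split_ifs <;> simp_all [List.mem_cons]

-- accumulating fold at one fixed cell (the k-loop)
theorem foldl_accum_aset (i j : Int) (l : List Int) (P : Array (Array Int) → Prop)
    (step : Array (Array Int) → Int → Array (Array Int)) (C : Array (Array Int) → Int → Int)
    (hstep : ∀ dp k, k ∈ l → P dp → step dp k = aset dp i j (aget dp i j + C dp k))
    (hP : ∀ dp k, k ∈ l → P dp → P (step dp k))
    (hC : ∀ dp k v, k ∈ l → P dp → C (aset dp i j v) k = C dp k)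
    (hrd : ∀ dp v, P dp → aget (aset dp i j v) i j = v)
    (hself : ∀ dp, P dp → aset dp i j (aget dp i j) = dp)
    (dp : Array (Array Int)) (hPdp : P dp) :
    l.foldl step dp = aset dp i j (aget dp i j + (l.map (C dp)).sum) := by
  induction l generalizing dp with
  | nil => simp [hself dp hPdp]
  | cons k t ih =>
    have hk := List.mem_cons_self (a := k) (l := t)
    rw [List.foldl_cons, hstep dp k hk hPdp]
    rw [ih (fun dp k hk => hstep dp k (List.mem_cons_of_mem _ hk))
          (fun dp k hk => hP dp k (List.mem_cons_of_mem _ hk))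
          (fun dp k v hk => hC dp k v (List.mem_cons_of_mem _ hk))
          _ (by rw [← hstep dp k hk hPdp]; exact hP dp k hk hPdp)]
    rw [aset_aset, hrd dp _ hPdp, List.map_cons, List.sum_cons]
    have hmap : t.map (C (aset dp i j (aget dp i j + C dp k))) = t.map (C dp) :=
      List.map_congr_left (fun y hy => hC dp y _ (List.mem_cons_of_mem _ hy) hPdp)
    rw [hmap, add_assoc]

-- one fold writing distinct cells of row i (the j-loop)
theorem foldl_aset_rowwise (i : Int) (l : List Int) (hnd : l.Nodup)
    (P : Array (Array Int) → Prop)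
    (step : Array (Array Int) → Int → Array (Array Int)) (W : Array (Array Int) → Int → Int)
    (hstep : ∀ dp j, j ∈ l → P dp → step dp j = aset dp i j (W dp j))
    (hP : ∀ dp j, j ∈ l → P dp → P (step dp j))
    (hW : ∀ dp j j' v, j ∈ l → j' ∈ l → j' ≠ j → P dp → W (aset dp i j' v) j = W dp j)
    (hget : ∀ dp v j' a b, j' ∈ l → P dp → 0 ≤ a → 0 ≤ b →
      aget (aset dp i j' v) a b = if a = i ∧ b = j' then v else aget dp a b)
    (dp : Array (Array Int)) (hPdp : P dp) :
    P (l.foldl step dp) ∧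
    ∀ a b : Int, 0 ≤ a → 0 ≤ b →
      aget (l.foldl step dp) a b = if a = i ∧ b ∈ l then W dp b else aget dp a b := by
  induction l generalizing dp with
  | nil => simpa using hPdp
  | cons x xs ih =>
    have hx := List.mem_cons_self (a := x) (l := xs)
    have hnd' : xs.Nodup := (List.nodup_cons.mp hnd).2
    have hxnot : x ∉ xs := (List.nodup_cons.mp hnd).1
    have hdp' : P (aset dp i x (W dp x)) := by
      rw [← hstep dp x hx hPdp]; exact hP dp x hx hPdp
    obtain ⟨ihP, ihget⟩ := ih hnd'
      (fun dp j hj => hstep dp j (List.mem_cons_of_mem _ hj))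
      (fun dp j hj => hP dp j (List.mem_cons_of_mem _ hj))
      (fun dp j j' v hj hj' hne => hW dp j j' v (List.mem_cons_of_mem _ hj) (List.mem_cons_of_mem _ hj') hne)
      (fun dp v j' a b hj' => hget dp v j' a b (List.mem_cons_of_mem _ hj'))
      (aset dp i x (W dp x)) hdp'
    rw [List.foldl_cons, hstep dp x hx hPdp]
    refine ⟨ihP, ?_⟩
    intro a b ha hb
    rw [ihget a b ha hb, hget dp (W dp x) x a b hx hPdp ha hb]
    by_cases hai : a = i
    · subst hai
      by_cases hmem : b ∈ xs
      · have hxb : x ≠ b := fun h => hxnot (h ▸ hmem)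
        rw [if_pos ⟨rfl, hmem⟩,
          hW dp b x (W dp x) (List.mem_cons_of_mem _ hmem) hx hxb hPdp,
          if_pos ⟨rfl, List.mem_cons_of_mem _ hmem⟩]
      · by_cases hbx : b = x
        · subst hbx
          simp [hmem]
        · simp [hmem, hbx, List.mem_cons]
    · simp [hai]

-- the l-loop, resolved by the sign of j - k
theorem pvALoop_pos (i j k : Int) (h : 0 < j - k) (l : List Int) (N : Int)
    (dp : Array (Array Int)) (hWF : pvWF N dp)
    (hi0 : 0 ≤ i) (hiN : i < N + 1) (hj0 : 0 ≤ j) (hjM : j < 9 * N + 1) (hjk : j - k ≠ j)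
    (hl : ∀ x ∈ l, 1 ≤ x ∧ x ≤ i) :
    pvALoop i j k l dp = aset dp i j (aget dp i j + (l.map (fun x => aget dp (i - x) (j - k))).sum) := by
  induction l generalizing dp with
  | nil =>
    rw [pvALoop, List.map_nil, List.sum_nil, add_zero,
      aset_self N dp hWF i j hi0 hiN hj0 hjM]
  | cons x xs ih =>
    obtain ⟨hx1, hxi⟩ := hl x (List.mem_cons_self ..)
    rw [pvALoop, if_pos h]
    set dp' := aset dp i j (aget dp i j + aget dp (i - x) (j - k)) with hdp'
    rw [ih dp' (pvWF_aset N dp i j _ hWF) (fun y hy => hl y (List.mem_cons_of_mem _ hy))]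
    have hrd : aget dp' i j = aget dp i j + aget dp (i - x) (j - k) := by
      rw [hdp', aget_aset N dp hWF i j _ i j hi0 hiN hj0 hjM hi0 hj0, if_pos ⟨rfl, rfl⟩]
    have hmap : xs.map (fun y => aget dp' (i - y) (j - k))
        = xs.map (fun y => aget dp (i - y) (j - k)) := by
      refine List.map_congr_left (fun y hy => ?_)
      obtain ⟨hy1, hyi⟩ := hl y (List.mem_cons_of_mem _ hy)
      rw [hdp', aget_aset N dp hWF i j _ (i - y) (j - k) hi0 hiN hj0 hjM (by omega) (by omega),
        if_neg (by intro hc; exact hjk hc.2)]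
    rw [hdp', aset_aset, hrd, hmap, List.map_cons, List.sum_cons, add_assoc]

theorem pvALoop_zero (i j k : Int) (h : j - k = 0) (x : Int) (xs : List Int)
    (dp : Array (Array Int)) :
    pvALoop i j k (x :: xs) dp = aset dp i j (aget dp i j + aget dp (i - x) (j - k)) := by
  rw [pvALoop, if_neg (by omega), if_pos h]

theorem pvALoop_neg (i j k : Int) (h : j - k < 0) (l : List Int) (dp : Array (Array Int)) :
    pvALoop i j k l dp = dp := by
  induction l with
  | nil => rw [pvALoop]
  | cons x xs ih => rw [pvALoop, if_neg (by omega), if_neg (by omega), ih]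

-- 1-D fold writing distinct cells (all three loops of B's body)
theorem foldl_sset_spec (l : List Int) (hnd : l.Nodup) (n : Nat)
    (step : Array Int → Int → Array Int) (G : Int → Int → Int)
    (hstep : ∀ S j, j ∈ l → S.size = n → step S j = sset S j (G (sget S j) j))
    (hmem : ∀ j ∈ l, 0 ≤ j ∧ j.toNat < n)
    (S : Array Int) (hS : S.size = n) :
    (l.foldl step S).size = n ∧
    ∀ x : Int, 0 ≤ x → sget (l.foldl step S) x = if x ∈ l then G (sget S x) x else sget S x := by
  induction l generalizing S with
  | nil => simpa using hS
  | cons j t ih =>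
    have hj := List.mem_cons_self (a := j) (l := t)
    obtain ⟨hj0, hjn⟩ := hmem j hj
    have hnd' : t.Nodup := (List.nodup_cons.mp hnd).2
    have hjt : j ∉ t := (List.nodup_cons.mp hnd).1
    have hS' : (sset S j (G (sget S j) j)).size = n := by rw [size_sset, hS]
    obtain ⟨ihs, ihget⟩ := ih hnd'
      (fun S j hjm => hstep S j (List.mem_cons_of_mem _ hjm))
      (fun y hy => hmem y (List.mem_cons_of_mem _ hy)) _ hS'
    rw [List.foldl_cons, hstep S j hj hS]
    refine ⟨ihs, ?_⟩
    intro x hx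
    rw [ihget x hx, sget_sset S j (G (sget S j) j) x hj0 (by omega) hx]
    by_cases hxt : x ∈ t
    · have : x ≠ j := fun hc => hjt (hc ▸ hxt)
      simp [hxt, this]
    · by_cases hxj : x = j
      · subst hxj
        simp [hxt]
      · simp [hxt, hxj, List.mem_cons]

-- dict folds
theorem pass_getD (l : List Int) (hnd : l.Nodup) (g : Int → Int) (d : PySem.Dict Int Int) (x : Int) :
    (l.foldl (fun d j => d.modify j 0 (fun v => v + g j)) d).getD x 0
      = d.getD x 0 + (if x ∈ l then g x else 0) := by
  induction l generalizing d with
  | nil => simp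
  | cons j t ih =>
    have hnd' : t.Nodup := (List.nodup_cons.mp hnd).2
    have hjt : j ∉ t := (List.nodup_cons.mp hnd).1
    rw [List.foldl_cons, ih hnd', PySem.Dict.getD_modify]
    by_cases hxj : x = j
    · subst hxj
      simp [hjt]
    · simp [hxj, List.mem_cons]

theorem bpass_getD (l : List Int) (hnd : l.Nodup) (S : Int → Int) (d : PySem.Dict Int Int) (x : Int) :
    (l.foldl (fun d j => d.insert j (S j)) d).getD x 0
      = if x ∈ l then S x else d.getD x 0 := by
  induction l generalizing d with
  | nil => simp
  | cons j t ih =>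
    have hnd' : t.Nodup := (List.nodup_cons.mp hnd).2
    have hjt : j ∉ t := (List.nodup_cons.mp hnd).1
    rw [List.foldl_cons, ih hnd', PySem.Dict.getD_insert]
    by_cases hxj : x = j
    · subst hxj
      simp [hjt]
    · simp [hxj, List.mem_cons]

theorem pvSet_update_self (s : PySem.Set Int) (l : List Int) (h : ∀ x ∈ l, x ∈ s) :
    s.update l = s := by
  rw [PySem.Set.update_eq_append_filter]
  have : (PySem.Set.ofList l).filter (fun y => !s.contains y) = [] := by
    rw [List.filter_eq_nil_iff]
    intro a ha
    have hmem : a ∈ s := h a ((PySem.Set.mem_ofList l a).mp ha)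
    simpa using hmem
  rw [this, List.append_nil]

-- the A-side dp invariant after processing rows 2..t
def pvInv (N t : Int) (dp : Array (Array Int)) : Prop :=
  pvWF N dp ∧
  (∀ a b : Int, 1 ≤ a → a ≤ t → 0 ≤ b → b ≤ 9 * N → aget dp a b = pvRow a.toNat b.toNat) ∧
  (∀ a b : Int, t < a → a ≤ N → 0 ≤ b → b ≤ 9 * N → aget dp a b = if b = 0 then 1 else 0)

-- proof-side names for B's intermediate values (definitionally the port's lets)
def pvBS1 (N : Int) : Array Int :=
  (PySem.List.pyRange 0 10).foldl (fun S j => sset S j 1) (Array.replicate (9 * N + 1).toNat 0)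

def pvBNew (N : Int) (S : Array Int) (i : Int) : Array Int :=
  (PySem.List.pyRange 1 (9 * i + 1)).foldl (fun new j =>
      sset new j ((PySem.List.pyRange 1 (min 10 j)).foldl (fun t k => t + sget S (j - k))
        (if j ≤ 9 then (1 : Int) else 0)))
    (#[(1 : Int)] ++ Array.replicate (9 * N).toNat 0)

def pvBStep (N : Int) (S : Array Int) (i : Int) : Array Int :=
  (PySem.List.pyRange 0 (9 * N + 1)).foldl (fun S' j => sset S' j (sget S' j + sget (pvBNew N S i) j)) S

def pvBSF (N : Int) : Array Int := (PySem.List.pyRange 2 (N + 1)).foldl (pvBStep N) (pvBS1 N)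

theorem pvBalt_eq (N : Int) :
    count_N_9_digit_sum_alt N
      = (((PySem.List.pyRange 0 (9 * N + 1)).foldl (fun d j => d.insert j (sget (pvBSF N) j))
          (PySem.Dict.empty (κ := Int) (ν := Int))).insert 0 1).items := rfl

theorem pvBS1_spec (N : Int) (hN : 1 ≤ N) :
    (pvBS1 N).size = (9 * N + 1).toNat ∧
    ∀ x : Int, 0 ≤ x → sget (pvBS1 N) x = pvCum 1 x.toNat := by
  have hmem : ∀ j ∈ PySem.List.pyRange 0 10, 0 ≤ j ∧ j.toNat < (9 * N + 1).toNat := by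
    intro j hj
    have := PySem.List.mem_pyRange_one.mp hj
    omega
  obtain ⟨hs, hval⟩ := foldl_sset_spec (PySem.List.pyRange 0 10)
    (PySem.List.nodup_pyRange_one 0 10) (9 * N + 1).toNat
    (step := fun S j => sset S j 1) (G := fun _ _ => 1) (fun S j _ _ => rfl) hmem
    (Array.replicate (9 * N + 1).toNat 0) (by simp)
  unfold pvBS1
  refine ⟨hs, ?_⟩
  intro x hx
  rw [hval x hx, sget_replicate]
  by_cases hm : x ∈ PySem.List.pyRange 0 10
  · have := PySem.List.mem_pyRange_one.mp hm
    rw [if_pos hm]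
    simp only [pvCum, pvTab]
    rw [if_pos (by omega)]
  · have hnx : ¬(0 ≤ x ∧ x < 10) := fun hc => hm (PySem.List.mem_pyRange_one.mpr hc)
    rw [if_neg hm]
    simp only [pvCum, pvTab]
    rw [if_neg (by omega)]

theorem pvBNew_spec (N i : Int) (hN : 1 ≤ N) (hi2 : 2 ≤ i) (hiN : i ≤ N)
    (S : Array Int) (hv : ∀ x : Int, 0 ≤ x → sget S x = pvCum (i - 1).toNat x.toNat) :
    (pvBNew N S i).size = (9 * N + 1).toNat ∧
    ∀ x : Int, 0 ≤ x → sget (pvBNew N S i) x = pvRow i.toNat x.toNat := by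
  have h0 : (#[(1 : Int)] ++ Array.replicate (9 * N).toNat 0).size = (9 * N + 1).toNat :=
    size_new0 (9 * N) (by omega)
  have hmem : ∀ j ∈ PySem.List.pyRange 1 (9 * i + 1), 0 ≤ j ∧ j.toNat < (9 * N + 1).toNat := by
    intro j hj
    have := PySem.List.mem_pyRange_one.mp hj
    omega
  obtain ⟨hsz, hval⟩ := foldl_sset_spec (PySem.List.pyRange 1 (9 * i + 1))
    (PySem.List.nodup_pyRange_one 1 (9 * i + 1)) (9 * N + 1).toNat
    (step := fun new j => sset new j ((PySem.List.pyRange 1 (min 10 j)).foldl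
      (fun t k => t + sget S (j - k)) (if j ≤ 9 then (1 : Int) else 0)))
    (G := fun _ j => (PySem.List.pyRange 1 (min 10 j)).foldl (fun t k => t + sget S (j - k))
      (if j ≤ 9 then (1 : Int) else 0))
    (fun S' j _ _ => rfl) hmem _ h0
  unfold pvBNew
  refine ⟨hsz, ?_⟩
  intro x hx
  rw [hval x hx, sget_new0 (9 * N) x hx]
  by_cases hxm : x ∈ PySem.List.pyRange 1 (9 * i + 1)
  · have hxb := PySem.List.mem_pyRange_one.mp hxm
    rw [if_pos hxm, PySem.List.foldl_add]
    have hsum : ((PySem.List.pyRange 1 (min 10 x)).map (fun k => sget S (x - k))).sum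
        = ((List.range (min 9 (x.toNat - 1))).map
            (fun k => pvCum (i - 1).toNat (x.toNat - (k + 1)))).sum := by
      rw [PySem.List.pyRange_one, List.map_map]
      rw [show ((min 10 x) - 1).toNat = min 9 (x.toNat - 1) from by omega]
      refine congrArg List.sum (List.map_congr_left ?_)
      intro k hk
      have hk' : k < min 9 (x.toNat - 1) := List.mem_range.mp hk
      simp only [Function.comp_apply]
      rw [hv (x - (1 + k)) (by omega)]
      congr 1
      omega
    rw [hsum]
    have hx9 : (if x ≤ 9 then (1 : Int) else 0) = (if x.toNat ≤ 9 then (1 : Int) else 0) := by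
      by_cases h : x ≤ 9
      · rw [if_pos h, if_pos (by omega)]
      · rw [if_neg h, if_neg (by omega)]
    rw [hx9, ← pvBody_split _ _ (by omega),
      pvRow_body i.toNat x.toNat (by omega) (by omega) (by omega),
      show i.toNat - 1 = (i - 1).toNat from by omega]
  · have hnx : ¬(1 ≤ x ∧ x < 9 * i + 1) := fun hc => hxm (PySem.List.mem_pyRange_one.mpr hc)
    rw [if_neg hxm]
    by_cases hx0 : x = 0
    · subst hx0
      rw [if_pos rfl, show (0 : Int).toNat = 0 from rfl, pvRow_zero_col i.toNat (by omega)]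
    · rw [if_neg hx0, pvRow_cutoff _ _ (by omega)]

theorem pvBStep_spec (N i : Int) (hN : 1 ≤ N) (hi2 : 2 ≤ i) (hiN : i ≤ N)
    (S : Array Int) (hsz : S.size = (9 * N + 1).toNat)
    (hv : ∀ x : Int, 0 ≤ x → sget S x = pvCum (i - 1).toNat x.toNat) :
    (pvBStep N S i).size = (9 * N + 1).toNat ∧
    ∀ x : Int, 0 ≤ x → sget (pvBStep N S i) x = pvCum i.toNat x.toNat := by
  obtain ⟨hnsz, hnval⟩ := pvBNew_spec N i hN hi2 hiN S hv
  have hmem : ∀ j ∈ PySem.List.pyRange 0 (9 * N + 1), 0 ≤ j ∧ j.toNat < (9 * N + 1).toNat := by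
    intro j hj
    have := PySem.List.mem_pyRange_one.mp hj
    omega
  obtain ⟨hs2, hval2⟩ := foldl_sset_spec (PySem.List.pyRange 0 (9 * N + 1))
    (PySem.List.nodup_pyRange_one 0 (9 * N + 1)) (9 * N + 1).toNat
    (step := fun S' j => sset S' j (sget S' j + sget (pvBNew N S i) j))
    (G := fun v j => v + sget (pvBNew N S i) j) (fun S' j _ _ => rfl) hmem S hsz
  unfold pvBStep
  refine ⟨hs2, ?_⟩
  intro x hx
  rw [hval2 x hx]
  by_cases hxm : x ∈ PySem.List.pyRange 0 (9 * N + 1)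
  · rw [if_pos hxm, hv x hx, hnval x hx,
      show i.toNat = (i - 1).toNat + 1 from by omega, pvCum_succ]
  · have hnx : ¬(0 ≤ x ∧ x < 9 * N + 1) := fun hc => hxm (PySem.List.mem_pyRange_one.mpr hc)
    rw [if_neg hxm, hv x hx, pvCum_cutoff _ _ (by omega), pvCum_cutoff _ _ (by omega)]

theorem pvBSF_spec (N : Int) (hN : 1 ≤ N) :
    ∀ x : Int, 0 ≤ x → sget (pvBSF N) x = pvCum N.toNat x.toNat := by
  have main : ∀ m : Nat, (m : Int) + 1 ≤ N →
      ((PySem.List.pyRange 2 (2 + (m : Int))).foldl (pvBStep N) (pvBS1 N)).size = (9 * N + 1).toNat ∧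
      ∀ x : Int, 0 ≤ x →
        sget ((PySem.List.pyRange 2 (2 + (m : Int))).foldl (pvBStep N) (pvBS1 N)) x
          = pvCum (1 + (m : Int)).toNat x.toNat := by
    intro m
    induction m with
    | zero =>
      intro _
      have he : PySem.List.pyRange 2 (2 + ((0 : Nat) : Int)) = [] := by
        rw [PySem.List.pyRange_one]
        simp
      rw [he]
      simp only [List.foldl_nil]
      obtain ⟨ha, hb⟩ := pvBS1_spec N hN
      refine ⟨ha, fun x hx => ?_⟩
      rw [hb x hx, show ((1 : Int) + ((0 : Nat) : Int)).toNat = 1 from by norm_num]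
    | succ m ih =>
      intro h
      have hcast : (2 : Int) + ((m + 1 : Nat) : Int) = (2 + (m : Int)) + 1 := by push_cast; ring
      rw [hcast, PySem.List.pyRange_one_succ_right (by omega), List.foldl_append,
        List.foldl_cons, List.foldl_nil]
      obtain ⟨ihs, ihv⟩ := ih (by omega)
      obtain ⟨hs', hv'⟩ := pvBStep_spec N (2 + (m : Int)) hN (by omega) (by omega) _ ihs
        (fun x hx => by rw [ihv x hx]; congr 1; omega)
      refine ⟨hs', fun x hx => ?_⟩
      rw [hv' x hx]
      congr 1
      omega
  obtain ⟨_, hv⟩ := main (N - 1).toNat (by omega)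
  intro x hx
  have hx2 := hv x hx
  rw [show (2 : Int) + (((N - 1).toNat : Nat) : Int) = N + 1 from by omega] at hx2
  rw [show ((1 : Int) + (((N - 1).toNat : Nat) : Int)).toNat = N.toNat from by omega] at hx2
  exact hx2

theorem pvBitems (N : Int) (hN : 1 ≤ N) :
    count_N_9_digit_sum_alt N
      = (PySem.List.pyRange 0 (9 * N + 1)).map
          (fun k => (k, if k = 0 then (1 : Int) else pvCum N.toNat k.toNat)) := by
  rw [pvBalt_eq]
  have hnd := PySem.List.nodup_pyRange_one 0 (9 * N + 1)
  have h0R : (0 : Int) ∈ PySem.List.pyRange 0 (9 * N + 1) :=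
    PySem.List.mem_pyRange_one.mpr ⟨le_rfl, by omega⟩
  set d := (PySem.List.pyRange 0 (9 * N + 1)).foldl
    (fun d j => d.insert j (sget (pvBSF N) j)) (PySem.Dict.empty (κ := Int) (ν := Int)) with hd
  have hkeys : d.keys = PySem.List.pyRange 0 (9 * N + 1) := by
    rw [hd, PySem.Dict.keys_foldl_insert]
    rw [show (PySem.Dict.empty (κ := Int) (ν := Int)).keys = [] from rfl]
    rw [PySem.Set.update_nil_left, PySem.Set.ofList_eq_self_of_nodup _ hnd]
  have hget : ∀ x : Int, d.getD x 0
      = if x ∈ PySem.List.pyRange 0 (9 * N + 1) then sget (pvBSF N) x else 0 := by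
    intro x
    rw [hd, bpass_getD _ hnd _ _ x]
    simp [PySem.Dict.getD_empty]
  have hcont : d.contains 0 = true := by
    rw [PySem.Dict.contains_eq_decide_mem_keys, hkeys]
    simp [h0R]
  have hkeys2 : (d.insert 0 1).keys = PySem.List.pyRange 0 (9 * N + 1) := by
    rw [PySem.Dict.keys_insert_of_contains d 1 hcont, hkeys]
  have hnd2 : (d.insert 0 1).keys.Nodup := by rw [hkeys2]; exact hnd
  rw [PySem.Dict.items_eq_map_keys _ hnd2 0, hkeys2]
  refine List.map_congr_left (fun k hk => ?_)
  have hkb := PySem.List.mem_pyRange_one.mp hk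
  have hvv : (d.insert 0 1).getD k 0 = if k = 0 then (1 : Int) else pvCum N.toNat k.toNat := by
    rw [PySem.Dict.getD_insert]
    by_cases hk0 : k = 0
    · rw [if_pos hk0, if_pos hk0]
    · rw [if_neg hk0, if_neg hk0, hget k, if_pos hk, pvBSF_spec N hN k (by omega)]
  rw [hvv]

-- proof-side names for A's dp table (definitionally the port's lets)
def pvADP2 (N : Int) : Array (Array Int) :=
  (PySem.List.pyRange 0 (N + 1)).foldl (fun dp i => aset dp i 0 1)
    ((PySem.List.pyRange 0 10).foldl (fun dp i => aset dp 1 i 1)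
      (Array.replicate (N + 1).toNat (Array.replicate (9 * N + 1).toNat 0)))

def pvADP (N : Int) : Array (Array Int) :=
  (PySem.List.pyRange 2 (N + 1)).foldl (fun dp i =>
    (PySem.List.pyRange 1 (9 * i + 1)).foldl (fun dp j =>
      (PySem.List.pyRange 1 10).foldl (fun dp k =>
        pvALoop i j k (PySem.List.pyRange 1 i) dp) dp) dp) (pvADP2 N)

theorem pvA_eq (N : Int) :
    count_N_9_digit_sum N
      = (((PySem.List.pyRange 1 (N + 1)).foldl (fun d i =>
            (PySem.List.pyRange 0 (9 * N + 1)).foldl (fun d j =>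
              d.modify j 0 (fun v => v + aget (pvADP N) i j)) d)
          (PySem.Dict.empty (κ := Int) (ν := Int))).insert 0 1).items := rfl

theorem pvALoop_WF (N i j k : Int) (l : List Int) (dp : Array (Array Int)) (h : pvWF N dp) :
    pvWF N (pvALoop i j k l dp) := by
  induction l generalizing dp with
  | nil => rw [pvALoop]; exact h
  | cons x xs ih =>
    rw [pvALoop]
    split_ifs
    · exact ih _ (pvWF_aset N dp i j _ h)
    · exact pvWF_aset N dp i j _ h
    · exact ih _ h

theorem pvADP2_inv (N : Int) (hN : 1 ≤ N) : pvInv N 1 (pvADP2 N) := by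
  unfold pvInv pvADP2
  set dp0 := Array.replicate (N + 1).toNat (Array.replicate (9 * N + 1).toNat (0 : Int)) with hdp0
  set dp1 := (PySem.List.pyRange 0 10).foldl (fun dp i => aset dp 1 i 1) dp0 with hdp1
  have hWF0 : pvWF N dp0 := pvWF_replicate N (by omega)
  have hl1 : ∀ x ∈ PySem.List.pyRange 0 10, 0 ≤ x ∧ x < 9 * N + 1 := by
    intro x hx
    have := PySem.List.mem_pyRange_one.mp hx
    omega
  have h1 : ∀ a b : Int, 0 ≤ a → 0 ≤ b →
      pvWF N dp1 ∧ aget dp1 a b = if a = 1 ∧ b ∈ PySem.List.pyRange 0 10 then 1 else aget dp0 a b :=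
    fun a b ha hb =>
      foldl_aset_fixrow N (PySem.List.pyRange 0 10) dp0 hWF0 1 1 (by omega) (by omega) hl1 a b ha hb
  have hWF1 : pvWF N dp1 := (h1 0 0 le_rfl le_rfl).1
  have hl2 : ∀ x ∈ PySem.List.pyRange 0 (N + 1), 0 ≤ x ∧ x < N + 1 := by
    intro x hx
    have := PySem.List.mem_pyRange_one.mp hx
    omega
  have h2 : ∀ a b : Int, 0 ≤ a → 0 ≤ b →
      pvWF N ((PySem.List.pyRange 0 (N + 1)).foldl (fun dp i => aset dp i 0 1) dp1) ∧
      aget ((PySem.List.pyRange 0 (N + 1)).foldl (fun dp i => aset dp i 0 1) dp1) a b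
        = if b = 0 ∧ a ∈ PySem.List.pyRange 0 (N + 1) then 1 else aget dp1 a b :=
    fun a b ha hb =>
      foldl_aset_fixcol N (PySem.List.pyRange 0 (N + 1)) dp1 hWF1 1 hl2 (by omega) a b ha hb
  refine ⟨(h2 0 0 le_rfl le_rfl).1, ?_, ?_⟩
  · intro a b ha1 hat hb0 hbM
    have ha : a = 1 := le_antisymm hat ha1
    subst ha
    rw [(h2 1 b (by omega) hb0).2]
    by_cases hb : b = 0
    · subst hb
      rw [if_pos ⟨rfl, PySem.List.mem_pyRange_one.mpr (by omega)⟩,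
        show ((1 : Int)).toNat = 1 from rfl, show ((0 : Int)).toNat = 0 from rfl, pvRow_one]
      norm_num
    · rw [if_neg (by simp [hb]), (h1 1 b (by omega) hb0).2]
      by_cases hb9 : b ∈ PySem.List.pyRange 0 10
      · have := PySem.List.mem_pyRange_one.mp hb9
        rw [if_pos ⟨rfl, hb9⟩, show ((1 : Int)).toNat = 1 from rfl, pvRow_one,
          if_pos (by omega)]
      · have hnb : ¬(0 ≤ b ∧ b < 10) := fun hc => hb9 (PySem.List.mem_pyRange_one.mpr hc)
        rw [if_neg (by rintro ⟨_, hc⟩; exact hb9 hc), hdp0, aget_replicate,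
          show ((1 : Int)).toNat = 1 from rfl, pvRow_one, if_neg (by omega)]
  · intro a b hat haN hb0 hbM
    rw [(h2 a b (by omega) hb0).2]
    by_cases hb : b = 0
    · subst hb
      rw [if_pos ⟨rfl, PySem.List.mem_pyRange_one.mpr (by omega)⟩, if_pos rfl]
    · rw [if_neg (by simp [hb]), (h1 a b (by omega) hb0).2,
        if_neg (by rintro ⟨hc, _⟩; omega), hdp0, aget_replicate, if_neg hb]

theorem pvAstep (N i : Int) (hN : 1 ≤ N) (hi2 : 2 ≤ i) (hiN : i ≤ N)
    (dp : Array (Array Int)) (hInv : pvInv N (i - 1) dp) :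
    pvInv N i ((PySem.List.pyRange 1 (9 * i + 1)).foldl (fun dp j =>
      (PySem.List.pyRange 1 10).foldl (fun dp k =>
        pvALoop i j k (PySem.List.pyRange 1 i) dp) dp) dp) := by
  obtain ⟨hWF, hrows, hinit⟩ := hInv
  have hil : (1 : Int) < i := by omega
  -- the value added by the k-loop for one digit k at cell (i, j)
  have hstep : ∀ (dp2 : Array (Array Int)) (j : Int), j ∈ PySem.List.pyRange 1 (9 * i + 1) →
      pvWF N dp2 →
      (PySem.List.pyRange 1 10).foldl (fun dp k => pvALoop i j k (PySem.List.pyRange 1 i) dp) dp2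
        = aset dp2 i j (aget dp2 i j + ((PySem.List.pyRange 1 10).map (fun k =>
            if 0 < j - k then ((PySem.List.pyRange 1 i).map (fun x => aget dp2 (i - x) (j - k))).sum
            else if j - k = 0 then aget dp2 (i - 1) 0 else 0)).sum) := by
    intro dp2 j hj hP2
    have hjb := PySem.List.mem_pyRange_one.mp hj
    refine foldl_accum_aset i j (PySem.List.pyRange 1 10) (pvWF N)
      (fun dp k => pvALoop i j k (PySem.List.pyRange 1 i) dp)
      (fun dpk k =>
        if 0 < j - k then ((PySem.List.pyRange 1 i).map (fun x => aget dpk (i - x) (j - k))).sum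
        else if j - k = 0 then aget dpk (i - 1) 0 else 0)
      ?_ ?_ ?_ ?_ ?_ dp2 hP2
    · intro dp3 k hk hP3
      have hkb := PySem.List.mem_pyRange_one.mp hk
      beta_reduce
      by_cases h1 : 0 < j - k
      · rw [if_pos h1]
        exact pvALoop_pos i j k h1 _ N dp3 hP3 (by omega) (by omega) (by omega) (by omega)
          (by omega) (fun x hx => by have := PySem.List.mem_pyRange_one.mp hx; omega)
      · by_cases h2 : j - k = 0
        · rw [if_neg h1, if_pos h2, PySem.List.pyRange_one_cons hil,
            pvALoop_zero i j k h2 _ _ dp3, h2]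
        · rw [if_neg h1, if_neg h2, pvALoop_neg i j k (by omega) _ dp3, add_zero,
            aset_self N dp3 hP3 i j (by omega) (by omega) (by omega) (by omega)]
    · intro dp3 k hk hP3
      exact pvALoop_WF N i j k _ dp3 hP3
    · intro dp3 k v hk hP3
      have hkb := PySem.List.mem_pyRange_one.mp hk
      beta_reduce
      by_cases h1 : 0 < j - k
      · rw [if_pos h1, if_pos h1]
        refine congrArg List.sum (List.map_congr_left ?_)
        intro x hx
        have hxb := PySem.List.mem_pyRange_one.mp hx
        rw [aget_aset N dp3 hP3 i j v (i - x) (j - k) (by omega) (by omega) (by omega) (by omega)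
          (by omega) (by omega), if_neg (by rintro ⟨hc, _⟩; omega)]
      · by_cases h2 : j - k = 0
        · rw [if_neg h1, if_pos h2, if_neg h1, if_pos h2,
            aget_aset N dp3 hP3 i j v (i - 1) 0 (by omega) (by omega) (by omega) (by omega)
              (by omega) (by omega), if_neg (by rintro ⟨hc, _⟩; omega)]
        · rw [if_neg h1, if_neg h2, if_neg h1, if_neg h2]
    · intro dp3 v hP3
      rw [aget_aset N dp3 hP3 i j v i j (by omega) (by omega) (by omega) (by omega)
        (by omega) (by omega), if_pos ⟨rfl, rfl⟩]
    · intro dp3 hP3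
      exact aset_self N dp3 hP3 i j (by omega) (by omega) (by omega) (by omega)
  -- the j-loop writes each cell (i, j) once
  obtain ⟨hWF', hget'⟩ := foldl_aset_rowwise i (PySem.List.pyRange 1 (9 * i + 1))
    (PySem.List.nodup_pyRange_one 1 (9 * i + 1)) (pvWF N)
    (fun dp j => (PySem.List.pyRange 1 10).foldl (fun dp k =>
      pvALoop i j k (PySem.List.pyRange 1 i) dp) dp)
    (fun dp j => aget dp i j + ((PySem.List.pyRange 1 10).map (fun k =>
      if 0 < j - k then ((PySem.List.pyRange 1 i).map (fun x => aget dp (i - x) (j - k))).sum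
      else if j - k = 0 then aget dp (i - 1) 0 else 0)).sum)
    hstep
    (fun dp3 j hj hP3 => by beta_reduce; rw [hstep dp3 j hj hP3]; exact pvWF_aset N dp3 i j _ hP3)
    (fun dp3 j j' v hj hj' hne hP3 => by
      have hjb := PySem.List.mem_pyRange_one.mp hj
      have hj'b := PySem.List.mem_pyRange_one.mp hj'
      have hbase : aget (aset dp3 i j' v) i j = aget dp3 i j := by
        rw [aget_aset N dp3 hP3 i j' v i j (by omega) (by omega) (by omega) (by omega)
          (by omega) (by omega), if_neg (by rintro ⟨_, hc⟩; exact hne hc.symm)]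
      have hsum : ((PySem.List.pyRange 1 10).map (fun k =>
          if 0 < j - k then ((PySem.List.pyRange 1 i).map
            (fun x => aget (aset dp3 i j' v) (i - x) (j - k))).sum
          else if j - k = 0 then aget (aset dp3 i j' v) (i - 1) 0 else 0)).sum
          = ((PySem.List.pyRange 1 10).map (fun k =>
          if 0 < j - k then ((PySem.List.pyRange 1 i).map
            (fun x => aget dp3 (i - x) (j - k))).sum
          else if j - k = 0 then aget dp3 (i - 1) 0 else 0)).sum := by
        refine congrArg List.sum (List.map_congr_left ?_)
        intro k hk
        have hkb := PySem.List.mem_pyRange_one.mp hk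
        by_cases h1 : 0 < j - k
        · rw [if_pos h1, if_pos h1]
          refine congrArg List.sum (List.map_congr_left ?_)
          intro x hx
          have hxb := PySem.List.mem_pyRange_one.mp hx
          rw [aget_aset N dp3 hP3 i j' v (i - x) (j - k) (by omega) (by omega) (by omega)
            (by omega) (by omega) (by omega), if_neg (by rintro ⟨hc, _⟩; omega)]
        · by_cases h2 : j - k = 0
          · rw [if_neg h1, if_pos h2, if_neg h1, if_pos h2,
              aget_aset N dp3 hP3 i j' v (i - 1) 0 (by omega) (by omega) (by omega) (by omega)
                (by omega) (by omega), if_neg (by rintro ⟨hc, _⟩; omega)]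
          · rw [if_neg h1, if_neg h2, if_neg h1, if_neg h2]
      beta_reduce
      rw [hbase, hsum])
    (fun dp3 v j' a b hj' hP3 ha hb => by
      have hj'b := PySem.List.mem_pyRange_one.mp hj'
      exact aget_aset N dp3 hP3 i j' v a b (by omega) (by omega) (by omega) (by omega) ha hb)
    dp hWF
  -- the value written at (i, j) is row i of the table
  have hWval : ∀ b : Int, b ∈ PySem.List.pyRange 1 (9 * i + 1) →
      aget dp i b + ((PySem.List.pyRange 1 10).map (fun k =>
        if 0 < b - k then ((PySem.List.pyRange 1 i).map (fun x => aget dp (i - x) (b - k))).sum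
        else if b - k = 0 then aget dp (i - 1) 0 else 0)).sum = pvRow i.toNat b.toNat := by
    intro b hbm
    have hbb := PySem.List.mem_pyRange_one.mp hbm
    have h0 : aget dp i b = 0 := by
      rw [hinit i b (by omega) (by omega) (by omega) (by omega), if_neg (by omega)]
    rw [h0, zero_add, PySem.List.pyRange_one 1 10, List.map_map,
      show ((10 : Int) - 1).toNat = 9 from rfl]
    have hterm : ∀ k ∈ List.range 9,
        ((fun k =>
          if 0 < b - k then ((PySem.List.pyRange 1 i).map (fun x => aget dp (i - x) (b - k))).sum
          else if b - k = 0 then aget dp (i - 1) 0 else 0) ∘ fun k : Nat => (1 : Int) + k) k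
        = (if k + 1 < b.toNat then pvCum (i - 1).toNat (b.toNat - (k + 1))
           else if k + 1 = b.toNat then (1 : Int) else 0) := by
      intro k hk
      have hk9 := List.mem_range.mp hk
      simp only [Function.comp_apply]
      by_cases h1 : 0 < b - (1 + (k : Int))
      · rw [if_pos h1, if_pos (by omega)]
        rw [PySem.List.pyRange_one 1 i, List.map_map]
        have hinner : ∀ x ∈ List.range (i - 1).toNat,
            ((fun x => aget dp (i - x) (b - (1 + (k : Int)))) ∘ fun x : Nat => (1 : Int) + x) x
            = pvRow ((i - 1).toNat - x) (b.toNat - (k + 1)) := by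
          intro x hx
          have hxm := List.mem_range.mp hx
          simp only [Function.comp_apply]
          rw [hrows (i - (1 + (x : Int))) (b - (1 + (k : Int))) (by omega) (by omega) (by omega)
            (by omega)]
          congr 1 <;> omega
        rw [List.map_congr_left hinner, pvSum_desc]
      · rw [if_neg h1]
        by_cases h2 : b - (1 + (k : Int)) = 0
        · rw [if_pos h2, if_neg (by omega), if_pos (by omega),
            hrows (i - 1) 0 (by omega) (by omega) le_rfl (by omega),
            show (0 : Int).toNat = 0 from rfl, pvRow_zero_col (i - 1).toNat (by omega)]
        · rw [if_neg h2, if_neg (by omega), if_neg (by omega)]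
    rw [List.map_congr_left hterm,
      pvRow_body i.toNat b.toNat (by omega) (by omega) (by omega)]
    rw [show i.toNat - 1 = (i - 1).toNat from by omega]
    rfl
  refine ⟨hWF', ?_, ?_⟩
  · intro a b ha1 hai hb0 hbM
    rw [hget' a b (by omega) hb0]
    by_cases hai' : a = i
    · subst hai'
      by_cases hbm : b ∈ PySem.List.pyRange 1 (9 * a + 1)
      · rw [if_pos ⟨rfl, hbm⟩]
        exact hWval b hbm
      · have hnb : ¬(1 ≤ b ∧ b < 9 * a + 1) :=
          fun hc => hbm (PySem.List.mem_pyRange_one.mpr hc)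
        rw [if_neg (by rintro ⟨_, hc⟩; exact hbm hc)]
        by_cases hb00 : b = 0
        · subst hb00
          rw [hinit a 0 (by omega) (by omega) le_rfl (by omega), if_pos rfl,
            show (0 : Int).toNat = 0 from rfl, pvRow_zero_col a.toNat (by omega)]
        · rw [hinit a b (by omega) (by omega) hb0 hbM, if_neg hb00,
            pvRow_cutoff a.toNat b.toNat (by omega)]
    · rw [if_neg (by rintro ⟨hc, _⟩; exact hai' hc)]
      exact hrows a b ha1 (by omega) hb0 hbM
  · intro a b hia haN hb0 hbM
    rw [hget' a b (by omega) hb0, if_neg (by rintro ⟨hc, _⟩; omega)]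
    exact hinit a b (by omega) haN hb0 hbM

theorem pvADP_inv (N : Int) (hN : 1 ≤ N) : pvInv N N (pvADP N) := by
  have main : ∀ m : Nat, (m : Int) + 1 ≤ N →
      pvInv N (1 + (m : Int)) ((PySem.List.pyRange 2 (2 + (m : Int))).foldl (fun dp i =>
        (PySem.List.pyRange 1 (9 * i + 1)).foldl (fun dp j =>
          (PySem.List.pyRange 1 10).foldl (fun dp k =>
            pvALoop i j k (PySem.List.pyRange 1 i) dp) dp) dp) (pvADP2 N)) := by
    intro m
    induction m with
    | zero =>
      intro _
      have he : PySem.List.pyRange 2 (2 + ((0 : Nat) : Int)) = [] := by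
        rw [PySem.List.pyRange_one]
        simp
      rw [he, show (1 : Int) + ((0 : Nat) : Int) = 1 from by norm_num]
      simp only [List.foldl_nil]
      exact pvADP2_inv N hN
    | succ m ih =>
      intro h
      rw [show (2 : Int) + ((m + 1 : Nat) : Int) = (2 + (m : Int)) + 1 from by push_cast; ring,
        PySem.List.pyRange_one_succ_right (by omega), List.foldl_append, List.foldl_cons,
        List.foldl_nil]
      have hprev := ih (by omega)
      have hstep := pvAstep N (2 + (m : Int)) hN (by omega) (by omega) _ (by
        rw [show (2 + (m : Int)) - 1 = 1 + (m : Int) from by ring]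
        exact hprev)
      rw [show (1 : Int) + ((m + 1 : Nat) : Int) = 2 + (m : Int) from by push_cast; ring]
      exact hstep
  have hfin := main (N - 1).toNat (by omega)
  rw [show (2 : Int) + (((N - 1).toNat : Nat) : Int) = N + 1 from by omega] at hfin
  rw [show (1 : Int) + (((N - 1).toNat : Nat) : Int) = N from by omega] at hfin
  exact hfin

theorem pvAfold_getD (il R : List Int) (hndR : R.Nodup) (g : Int → Int → Int)
    (d : PySem.Dict Int Int) (x : Int) :
    (il.foldl (fun d i => R.foldl (fun d j => d.modify j 0 (fun v => v + g i j)) d) d).getD x 0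
      = d.getD x 0 + (if x ∈ R then (il.map (fun i => g i x)).sum else 0) := by
  induction il generalizing d with
  | nil => simp
  | cons i t ih =>
    rw [List.foldl_cons, ih, pass_getD R hndR (g i) d x, List.map_cons, List.sum_cons]
    by_cases hx : x ∈ R
    · rw [if_pos hx, if_pos hx, if_pos hx, add_assoc]
    · rw [if_neg hx, if_neg hx, if_neg hx]
      ring

theorem pvAfold_keys (il R : List Int) (g : Int → Int → Int) (d : PySem.Dict Int Int)
    (hkd : d.keys = R) :
    (il.foldl (fun d i => R.foldl (fun d j => d.modify j 0 (fun v => v + g i j)) d) d).keys = R := by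
  induction il generalizing d with
  | nil => simpa using hkd
  | cons i t ih =>
    rw [List.foldl_cons]
    refine ih _ ?_
    rw [PySem.Dict.keys_foldl_modify, hkd, pvSet_update_self R R (fun x hx => hx)]

theorem pvAitems (N : Int) (hN : 1 ≤ N) :
    count_N_9_digit_sum N
      = (PySem.List.pyRange 0 (9 * N + 1)).map
          (fun k => (k, if k = 0 then (1 : Int) else pvCum N.toNat k.toNat)) := by
  rw [pvA_eq]
  obtain ⟨hWFd, hrowsd, _⟩ := pvADP_inv N hN
  have hnd := PySem.List.nodup_pyRange_one 0 (9 * N + 1)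
  have h0R : (0 : Int) ∈ PySem.List.pyRange 0 (9 * N + 1) :=
    PySem.List.mem_pyRange_one.mpr ⟨le_rfl, by omega⟩
  set d := (PySem.List.pyRange 1 (N + 1)).foldl (fun d i =>
    (PySem.List.pyRange 0 (9 * N + 1)).foldl (fun d j =>
      d.modify j 0 (fun v => v + aget (pvADP N) i j)) d)
    (PySem.Dict.empty (κ := Int) (ν := Int)) with hd
  have hkeys : d.keys = PySem.List.pyRange 0 (9 * N + 1) := by
    rw [hd, PySem.List.pyRange_one_cons (show (1 : Int) < N + 1 from by omega), List.foldl_cons]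
    refine pvAfold_keys _ _ _ _ ?_
    rw [PySem.Dict.keys_foldl_modify,
      show (PySem.Dict.empty (κ := Int) (ν := Int)).keys = [] from rfl,
      PySem.Set.update_nil_left, PySem.Set.ofList_eq_self_of_nodup _ hnd]
  have hget : ∀ x : Int, x ∈ PySem.List.pyRange 0 (9 * N + 1) →
      d.getD x 0 = pvCum N.toNat x.toNat := by
    intro x hx
    have hxb := PySem.List.mem_pyRange_one.mp hx
    rw [hd, pvAfold_getD _ _ hnd _ _ x, if_pos hx]
    rw [show (PySem.Dict.empty (κ := Int) (ν := Int)).getD x 0 = 0 from rfl, zero_add]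
    rw [PySem.List.pyRange_one 1 (N + 1), List.map_map,
      show ((N : Int) + 1 - 1).toNat = N.toNat from by omega]
    have hterm : ∀ k ∈ List.range N.toNat,
        ((fun i => aget (pvADP N) i x) ∘ fun k : Nat => (1 : Int) + k) k
          = pvRow (k + 1) x.toNat := by
      intro k hk
      have hkm := List.mem_range.mp hk
      simp only [Function.comp_apply]
      rw [hrowsd (1 + (k : Int)) x (by omega) (by omega) (by omega) (by omega)]
      congr 1
      omega
    rw [List.map_congr_left hterm, pvSum_asc]
  have hcont : d.contains 0 = true := by
    rw [PySem.Dict.contains_eq_decide_mem_keys, hkeys]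
    simp [h0R]
  have hkeys2 : (d.insert 0 1).keys = PySem.List.pyRange 0 (9 * N + 1) := by
    rw [PySem.Dict.keys_insert_of_contains d 1 hcont, hkeys]
  have hnd2 : (d.insert 0 1).keys.Nodup := by rw [hkeys2]; exact hnd
  rw [PySem.Dict.items_eq_map_keys _ hnd2 0, hkeys2]
  refine List.map_congr_left (fun k hk => ?_)
  have hvv : (d.insert 0 1).getD k 0 = if k = 0 then (1 : Int) else pvCum N.toNat k.toNat := by
    rw [PySem.Dict.getD_insert]
    by_cases hk0 : k = 0
    · rw [if_pos hk0, if_pos hk0]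
    · rw [if_neg hk0, if_neg hk0, hget k hk]
  rw [hvv]

-- ===== VERDICT (by name: the statement is the Claim_ definition above) =====
theorem count_N_9_digit_sum_spec : Claim_equal_count_N_9_digit_sum := by
  intro N _ hpre
  unfold Spec_count_N_9_digit_sum
  rw [pvAitems N hpre, pvBitems N hpre]
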